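-- pv_equiv track=rewrite | github.com/cecile-cayere/advent-of-code | utils.py | rshift_bits
-- ===== SOURCE A (Python) =====
-- def rshift_bits(bits_table, shift):
--     result = bits_table[:]
--
--     while(shift > 0):
--         i = len(bits_table) - 2
--         while(i >= 0):
--             result[i + 1] = result[i]
--             i = i - 1
--         result[0] = 0
--         shift = shift - 1
--
--     return result
-- ===== SOURCE B (Python) =====
-- def rshift_bits(bits_table, shift):
--     n = len(bits_table)
--     if shift <= 0:
--         return bits_table[:]
--     return [bits_table[i - shift] if i >= shift else 0 for i in range(n)]
-- ===== Notes on version B (the rewrite author's own statement) =====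
-- stated objective: faster
-- what changed: Replaces the shift-many in-place bubble passes with one comprehension that maps each output index directly to its source bit (or 0).
import Mathlib
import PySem

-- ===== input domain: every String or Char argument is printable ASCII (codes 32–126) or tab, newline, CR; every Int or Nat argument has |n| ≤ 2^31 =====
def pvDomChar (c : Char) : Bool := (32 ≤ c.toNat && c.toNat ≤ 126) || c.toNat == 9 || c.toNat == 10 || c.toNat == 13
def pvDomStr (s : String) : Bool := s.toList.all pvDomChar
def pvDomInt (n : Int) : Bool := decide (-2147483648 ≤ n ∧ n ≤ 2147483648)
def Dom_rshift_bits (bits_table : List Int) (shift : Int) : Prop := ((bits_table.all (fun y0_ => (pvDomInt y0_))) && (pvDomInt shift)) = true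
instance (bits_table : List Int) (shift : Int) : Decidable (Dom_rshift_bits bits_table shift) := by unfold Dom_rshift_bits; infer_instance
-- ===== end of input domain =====

-- B replaces A's shift-many in-place bubble passes by one direct index-mapping pass.

-- ===== PORT A =====
-- inner while loop: i counts down from len-2 to 0, result[i+1] = result[i]
def rshiftInnerA (r : List Int) (i : Int) : List Int :=
  if _h : 0 ≤ i then rshiftInnerA (r.set (i + 1).toNat (r.getD i.toNat 0)) (i - 1) else r
  termination_by (i + 1).toNat
  decreasing_by omega

-- outer while loop: shift > 0 with shift decremented each pass (= shift.toNat passes)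
def rshiftLoopA (n : Int) (fuel : Nat) (r : List Int) : List Int :=
  match fuel with
  | 0 => r
  | k + 1 => rshiftLoopA n k ((rshiftInnerA r (n - 2)).set 0 0)

def rshift_bits (bits_table : List Int) (shift : Int) : List Int :=
  rshiftLoopA ((bits_table.length : Int)) shift.toNat bits_table

-- ===== PORT B =====
def rshift_bits_alt (bits_table : List Int) (shift : Int) : List Int :=
  if shift ≤ 0 then bits_table
  else (List.range bits_table.length).map
    (fun (i : Nat) => if shift ≤ (i : Int) then bits_table.getD ((i - shift.toNat : Nat)) 0 else 0)

-- ===== PRECONDITION & SPEC =====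
-- Pre_ excludes only the inputs where A raises IndexError: empty bits_table with shift > 0.
def Pre_rshift_bits (bits_table : List Int) (shift : Int) : Prop :=
  bits_table ≠ [] ∨ shift ≤ 0
instance (bits_table : List Int) (shift : Int) : Decidable (Pre_rshift_bits bits_table shift) := by
  unfold Pre_rshift_bits; infer_instance

def pvWitness_rshift_bits : List Int × Int := ([1, 0, 1], 1)

def Spec_rshift_bits (bits_table : List Int) (shift : Int) (out : List Int) : Prop :=
  out = rshift_bits_alt bits_table shift
instance (bits_table : List Int) (shift : Int) (out : List Int) : Decidable (Spec_rshift_bits bits_table shift out) := by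
  unfold Spec_rshift_bits; infer_instance

-- ===== CLAIM (what is proved, stated in full; the proofs are below) =====
def Claim_equal_rshift_bits : Prop := ∀ (bits_table : List Int) (shift : Int), Dom_rshift_bits bits_table shift → Pre_rshift_bits bits_table shift → Spec_rshift_bits bits_table shift (rshift_bits bits_table shift)

-- ===== LEMMAS AND PROOFS =====

theorem innerA_nat (k : Nat) (r : List Int) (hn : k + 2 ≤ r.length) :
    rshiftInnerA r (k : Int) = r.take 1 ++ r.take (k+1) ++ r.drop (k+2) := by
  induction k generalizing r with
  | zero =>
    rw [rshiftInnerA]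
    norm_num
    rw [rshiftInnerA]
    norm_num
    apply List.ext_getElem
    · simp; omega
    · intro i h1 h2
      simp [List.getElem_set, List.getElem_append,
        List.getElem?_eq_getElem (by omega : 0 < r.length)]
      split_ifs <;>
        (try simp only [List.length_take, List.length_append, List.length_set, List.length_drop, List.length_cons] at *) <;>
        first | rfl | omega | (congr 1 <;> omega)
  | succ k ih =>
    rw [rshiftInnerA, dif_pos (show (0:Int) ≤ ((k+1:Nat):Int) by positivity)]
    push_cast
    simp only [show ((k:Int) + 1 - 1) = (k:Int) by ring,
      show ((k:Int) + 1 + 1).toNat = k + 2 by omega,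
      show ((k:Int) + 1).toNat = k + 1 by omega,
      List.getElem?_eq_getElem (show k + 1 < r.length by omega), Option.getD_some]
    rw [ih _ (by simp; omega)]
    have hset : k + 2 < r.length := by omega
    have hget : k + 1 < r.length := by omega
    rw [List.getD_eq_getElem _ _ hget]
    rw [List.take_set, List.take_set, List.drop_set]
    rw [List.set_eq_of_length_le (by simp), List.set_eq_of_length_le (by simp)]
    rw [if_neg (by omega), Nat.sub_self]
    rw [List.drop_eq_getElem_cons hset, List.set_cons_zero]
    have htake : List.take (k+1+1) r = List.take (k+1) r ++ [r[k + 1]] := by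
      rw [List.take_add_one, List.getElem?_eq_getElem hget]; rfl
    rw [show k + 2 + 1 = k + 1 + 2 by omega, htake]; simp [List.append_assoc]; rw [htake, List.append_assoc, List.singleton_append]

theorem rshift_once (r : List Int) (hr : r ≠ []) :
    (rshiftInnerA r ((r.length : Int) - 2)).set 0 0 = 0 :: r.dropLast := by
  rcases Nat.lt_or_ge r.length 2 with h2 | h2
  · -- length 1
    have h1 : r.length = 1 := by
      cases r with
      | nil => exact absurd rfl hr
      | cons a t => simp only [List.length_cons] at h2 ⊢; omega
    rw [rshiftInnerA, dif_neg (by omega)]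
    cases r with
    | nil => exact absurd rfl hr
    | cons a t =>
      have ht : t = [] := by
        have h0 : t.length = 0 := by simp only [List.length_cons] at h1; omega
        exact List.length_eq_zero_iff.mp h0
      subst ht; rfl
  · have hk : ((r.length : Int) - 2) = ((r.length - 2 : Nat) : Int) := by omega
    rw [hk, innerA_nat _ _ (by omega)]
    have h1 : r.length - 2 + 1 = r.length - 1 := by omega
    have h2' : r.length - 2 + 2 = r.length := by omega
    rw [h1, h2', List.drop_length, List.append_nil]
    apply List.ext_getElem
    · simp [List.length_dropLast]; omega
    · intro i hh1 hh2
      simp only [List.length_append, List.length_take, List.length_set, List.length_drop, List.length_cons, List.length_dropLast] at hh1 hh2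
      simp only [List.getElem_set, List.getElem_append, List.getElem_take, List.getElem_cons,
        List.length_take, List.length_append, List.getElem_dropLast]
      split_ifs <;> first | rfl | omega | (congr 1 <;> omega)

theorem rshiftLoopA_spec (k : Nat) (r : List Int) (hr : r ≠ []) :
    rshiftLoopA ((r.length : Int)) k r =
      List.replicate (min k r.length) 0 ++ r.take (r.length - k) := by
  induction k generalizing r with
  | zero => simp [rshiftLoopA]
  | succ k ih =>
    rw [rshiftLoopA, rshift_once r hr]
    have hlen : (0 :: r.dropLast).length = r.length := by
      simp [List.length_dropLast]; cases r with
      | nil => exact absurd rfl hr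
      | cons a t => simp
    rw [show (r.length : Int) = ((0 :: r.dropLast).length : Int) by rw [hlen]]
    rw [ih _ (by simp)]
    rw [hlen]
    rcases Nat.lt_or_ge k r.length with h | h
    · have : min k r.length = k := by omega
      have h2 : min (k+1) r.length = k + 1 := by omega
      rw [this, h2]
      have : r.length - k = (r.length - (k+1)) + 1 := by omega
      rw [this, List.take_succ_cons]
      have htake : r.dropLast.take (r.length - (k+1)) = r.take (r.length - (k+1)) := by
        rw [List.dropLast_eq_take, List.take_take]
        congr 1; omega
      rw [htake, List.replicate_succ']
      simp
    · have h1 : min k r.length = r.length := by omega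
      have h2 : min (k+1) r.length = r.length := by omega
      have h3 : r.length - k = 0 := by omega
      have h4 : r.length - (k+1) = 0 := by omega
      simp [h1, h2, h3, h4]

theorem alt_spec (bits : List Int) (shift : Int) (hs : 0 < shift) :
    rshift_bits_alt bits shift =
      List.replicate (min shift.toNat bits.length) 0 ++ bits.take (bits.length - shift.toNat) := by
  unfold rshift_bits_alt
  rw [if_neg (by omega)]
  have hcast : ((shift.toNat : Int)) = shift := Int.toNat_of_nonneg (by omega)
  apply List.ext_getElem
  · simp; omega
  · intro i h1 h2
    simp only [List.getElem_map, List.getElem_range]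
    have hi : i < bits.length := by simpa using h1
    by_cases hge : shift.toNat ≤ i
    · rw [if_pos (by omega)]
      rw [List.getD_eq_getElem _ _ (show i - shift.toNat < bits.length by omega)]
      rw [List.getElem_append_right (by simp; omega)]
      simp only [List.getElem_take, List.length_replicate]
      congr 1
      omega
    · rw [if_neg (by omega)]
      rw [List.getElem_append_left (by simp; omega)]
      simp

-- ===== VERDICT (by name: the statement is the Claim_ definition above) =====
theorem rshift_bits_spec : Claim_equal_rshift_bits := by
  intro bits shift _ hpre
  unfold Spec_rshift_bits rshift_bits
  by_cases hs : shift ≤ 0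
  · have : shift.toNat = 0 := Int.toNat_of_nonpos hs
    simp [this, rshiftLoopA, rshift_bits_alt, hs]
  · have hs' : 0 < shift := by omega
    have hr : bits ≠ [] := hpre.resolve_right (by omega)
    rw [rshiftLoopA_spec _ _ hr, alt_spec _ _ hs']
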